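-- pv_equiv track=rewrite | github.com/qhxiv/code-ptit-solutions | Python/PY01055 - SỐ XEN KẼ.py | check
-- ===== SOURCE A (Python) =====
-- def check(n):
--     if n[0] == n[1]:
--         return False
--     d = len(n)
--     if d & 1 == 0:
--         return False
--     for i in range(2, d, 2):
--         if (n[i] != n[i - 2]):
--             return False
--     return True
-- ===== SOURCE B (Python) =====
-- def check(n):
--     if n[0] == n[1]:
--         return False
--     if len(n) % 2 == 0:
--         return False
--     ev = n[::2]
--     return ev == n[0] * len(ev)
-- ===== Notes on version B (the rewrite author's own statement) =====
-- stated objective: simpler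
-- what changed: Replaces the index loop comparing n[i] with n[i-2] for even i by a whole-string step-2 slice compared against n[0] repeated, eliminating index arithmetic.
import Mathlib
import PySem

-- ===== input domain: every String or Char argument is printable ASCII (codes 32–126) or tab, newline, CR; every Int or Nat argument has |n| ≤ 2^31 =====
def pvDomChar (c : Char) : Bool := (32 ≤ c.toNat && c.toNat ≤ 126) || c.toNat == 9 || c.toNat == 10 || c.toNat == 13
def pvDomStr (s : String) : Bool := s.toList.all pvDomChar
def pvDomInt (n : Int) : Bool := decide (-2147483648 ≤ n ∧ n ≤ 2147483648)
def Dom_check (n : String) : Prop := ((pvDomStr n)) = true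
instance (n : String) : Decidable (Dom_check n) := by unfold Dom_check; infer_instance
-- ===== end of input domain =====

-- B replaces A's even-index pairwise loop (n[i] vs n[i-2]) by comparing the step-2 slice
-- n[::2] against n[0] repeated: simpler, no index arithmetic.

-- ===== PORT A =====
def check (n : String) : Bool :=
  let l := n.toList
  if PySem.List.pyGetD l 0 ' ' == PySem.List.pyGetD l 1 ' ' then false
  else
    let d : Int := PySem.Str.len n
    if PySem.Int.band d 1 == 0 then false
    else
      (PySem.List.pyRange 2 d 2).all
        (fun i => !(PySem.List.pyGetD l i ' ' != PySem.List.pyGetD l (i - 2) ' '))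

-- ===== PORT B =====
def check_alt (n : String) : Bool :=
  let l := n.toList
  if PySem.List.pyGetD l 0 ' ' == PySem.List.pyGetD l 1 ' ' then false
  else if PySem.Int.mod (PySem.Str.len n) 2 == 0 then false
  else
    let ev := (PySem.List.slice? l none none 2).getD []
    ev == List.replicate ev.length (PySem.List.pyGetD l 0 ' ')

-- ===== PRECONDITION & SPEC =====
-- Pre_ excludes strings of length < 2, on which A raises IndexError at n[1] (or n[0]).
def Pre_check (n : String) : Prop := 2 ≤ n.toList.length
instance (n : String) : Decidable (Pre_check n) := by unfold Pre_check; infer_instance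

def pvWitness_check : String := "121"

def Spec_check (n : String) (out : Bool) : Prop := out = check_alt n
instance (n : String) (out : Bool) : Decidable (Spec_check n out) := by unfold Spec_check; infer_instance

-- ===== CLAIM (what is proved, stated in full; the proofs are below) =====
def Claim_equal_check : Prop := ∀ (n : String), Dom_check n → Pre_check n → Spec_check n (check n)

-- ===== LEMMAS AND PROOFS =====

-- a chain of equalities with the predecessor is the same as all-equal-to-the-first
theorem chain_iff_const (f : ℕ → Char) (m : ℕ) :
    (∀ k < m, f (k + 1) = f k) ↔ (∀ j < m + 1, f j = f 0) := by
  induction m with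
  | zero => simp
  | succ m ih =>
    constructor
    · intro h j hj
      rcases Nat.lt_succ_iff_lt_or_eq.mp hj with hj' | hj'
      · exact (ih.mp fun k hk => h k (Nat.lt_succ_of_lt hk)) j hj'
      · subst hj'
        rw [h m (Nat.lt_succ_self m)]
        exact (ih.mp fun k hk => h k (Nat.lt_succ_of_lt hk)) m (Nat.lt_succ_self m)
    · intro h k hk
      rcases Nat.lt_succ_iff_lt_or_eq.mp hk with hk' | hk'
      · exact (ih.mpr fun j hj => h j (Nat.lt_succ_of_lt hj)) k hk'
      · subst hk'
        rw [h (k + 1) (Nat.lt_succ_self _), h k (Nat.lt_succ_of_lt (Nat.lt_succ_self _))]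

-- the step-2 slice of l is the list of even-indexed elements
theorem slice2_eq_map (l : List Char) :
    (PySem.List.slice? l none none 2).getD [] =
      (List.range ((l.length + 1) / 2)).map (fun k => l.getD (2 * k) ' ') := by
  simp only [PySem.List.slice?, PySem.List.sliceIndices]
  norm_num
  have hcount : (if 0 < l.length then (((l.length : Int) + 2 - 1) / 2).toNat else 0)
      = (l.length + 1) / 2 := by
    split_ifs with h
    · omega
    · omega
  rw [hcount]
  rw [List.filterMap_eq_map_iff_forall_eq_some.mpr ?_]
  intro k hk
  rw [List.mem_range] at hk
  have h2k : ((2:Int) * (k : Int)).toNat = 2 * k := by omega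
  have hlt : 2 * k < l.length := by omega
  rw [h2k, List.getElem?_eq_getElem hlt]
  simp

theorem map_eq_replicate_iff (f : ℕ → Char) (c : ℕ) :
    ((List.range c).map f = List.replicate c (f 0)) ↔ (∀ j < c, f j = f 0) := by
  rw [List.eq_replicate_iff]
  simp

theorem check_eq_alt (n : String) (hpre : 2 ≤ n.toList.length) :
    check n = check_alt n := by
  unfold check check_alt
  simp only [PySem.Int.band_one, PySem.Str.len_eq]
  split_ifs with h1 h2
  · rfl
  · rfl
  · -- main branch: d odd, first two chars differ
    set l := n.toList with hl
    have hodd : ¬ ((l.length : Int) % 2 = 0) := by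
      simpa [PySem.Int.mod_eq_emod_of_pos (a := (l.length : Int)) (by positivity : (0:Int) < 2)]
        using h2
    rw [slice2_eq_map l]
    set c := (l.length + 1) / 2 with hc
    have hc1 : 1 ≤ c := by omega
    have hf0 : (fun k => l.getD (2 * k) ' ') 0 = PySem.List.pyGetD l 0 ' ' := by
      simp [PySem.List.pyGetD_of_nonneg l ' ' (le_refl (0:Int))]
    -- rewrite A's range with step 2
    rw [PySem.List.pyRange_of_pos 2 (l.length : Int) (by norm_num : (0:Int) < 2)]
    have hm : (if (2:Int) < (l.length : Int) then (((l.length : Int) - 2 + 2 - 1) / 2).toNat else 0)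
        = c - 1 := by
      split_ifs with h <;> omega
    rw [hm]
    rw [Bool.eq_iff_iff]
    simp only [List.all_map, List.all_eq_true, List.mem_range, Function.comp, beq_iff_eq,
      Bool.not_eq_eq_eq_not, Bool.not_true, bne_eq_false_iff_eq, List.length_map,
      List.length_range]
    have hside : ∀ k < c - 1,
        (PySem.List.pyGetD l (2 + 2 * (k:Int)) ' ' = PySem.List.pyGetD l (2 + 2 * (k:Int) - 2) ' ')
        ↔ (l.getD (2 * (k + 1)) ' ' = l.getD (2 * k) ' ') := by
      intro k hk
      rw [PySem.List.pyGetD_of_nonneg l ' ' (by positivity : (0:Int) ≤ 2 + 2 * (k:Int)),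
        PySem.List.pyGetD_of_nonneg l ' ' (by omega : (0:Int) ≤ 2 + 2 * (k:Int) - 2)]
      have e1 : ((2:Int) + 2 * (k:Int)).toNat = 2 * (k + 1) := by omega
      have e2 : ((2:Int) + 2 * (k:Int) - 2).toNat = 2 * k := by omega
      rw [e1, e2]
    constructor
    · intro hA
      have hcst : ∀ j < c, l.getD (2 * j) ' ' = l.getD (2 * 0) ' ' := by
        have := (chain_iff_const (fun k => l.getD (2 * k) ' ') (c - 1)).mp
          (fun k hk => (hside k hk).mp (hA k hk))
        intro j hj
        exact this j (by omega)
      have hrep := (map_eq_replicate_iff (fun k => l.getD (2 * k) ' ') c).mpr hcst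
      rw [← hf0]
      exact hrep
    · intro hB k hk
      rw [hside k hk]
      have hrep : ((List.range c).map fun k => l.getD (2 * k) ' ') =
          List.replicate c ((fun k => l.getD (2 * k) ' ') 0) := by
        rw [hB, hf0]
      have hall := (map_eq_replicate_iff (fun k => l.getD (2 * k) ' ') c).mp hrep
      have h1 := hall (k + 1) (by omega)
      have h2' := hall k (by omega)
      simp only at h1 h2'
      rw [h1, h2']

-- ===== VERDICT (by name: the statement is the Claim_ definition above) =====
theorem check_spec : Claim_equal_check := by
  intro n _ hpre
  exact check_eq_alt n hpre
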